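-- pv_equiv track=rewrite | github.com/yeongminChae/Python-Practice | 프로그래머스/0/120812. 최빈값 구하기/최빈값 구하기.py | solution
-- ===== SOURCE A (Python) =====
-- def solution(array):
--     set_arr = set(sorted(array))
--     new_arr = []
--
--     answer = 0
--     temp = 0
--     index = 0
--
--     for i in set_arr :
--         if array.count(i) >= temp :
--             temp = array.count(i)
--             index = i
--             new_arr.append(array.count(i))
--
--     if new_arr.count(max(new_arr)) > 1 :
--         return -1
--
--     return index
-- ===== SOURCE B (Python) =====
-- def solution(array):
--     # Sort once, then scan grouping consecutive equal elements into runs.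
--     runs = []
--     cur_v = 0
--     cur_c = 0
--     for x in sorted(array):
--         if cur_c != 0 and x == cur_v:
--             cur_c += 1
--         else:
--             if cur_c != 0:
--                 runs.append((cur_c, cur_v))
--             cur_v = x
--             cur_c = 1
--     if cur_c != 0:
--         runs.append((cur_c, cur_v))
--     best = max([c for c, _ in runs])  # ValueError on empty input, like A's max([])
--     ties = [v for c, v in runs if c == best]
--     return ties[0] if len(ties) == 1 else -1
-- ===== Notes on version B (the rewrite author's own statement) =====
-- stated objective: faster
-- what changed: Replaces the per-distinct-value array.count scans (two per set element) with a single sort-then-scan that groups consecutive equal elements into (length,value) runs and picks the unique longest run, or -1 on a tie.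
import Mathlib
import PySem

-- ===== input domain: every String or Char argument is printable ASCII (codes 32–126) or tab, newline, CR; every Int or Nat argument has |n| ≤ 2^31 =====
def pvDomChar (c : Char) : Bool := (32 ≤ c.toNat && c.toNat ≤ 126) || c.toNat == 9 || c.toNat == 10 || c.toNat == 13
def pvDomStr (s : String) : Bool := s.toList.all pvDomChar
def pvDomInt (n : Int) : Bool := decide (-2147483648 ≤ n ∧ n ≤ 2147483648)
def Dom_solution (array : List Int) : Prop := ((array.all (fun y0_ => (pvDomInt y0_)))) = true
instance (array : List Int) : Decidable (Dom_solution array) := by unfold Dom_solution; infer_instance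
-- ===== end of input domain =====

-- B sorts once and groups consecutive equal elements into runs instead of A's repeated array.count scans.
-- A iterates over a Python set; its RETURN value is independent of that iteration order
-- (proved implicitly: either the max run length is tied, giving -1, or the unique mode is returned).

-- ===== PORT A =====
def solution (array : List Int) : Int :=
  -- set_arr = set(sorted(array)); loop state (temp, index, new_arr); answer is never used
  let set_arr : PySem.Set Int := PySem.Set.ofList (PySem.List.sorted array (fun x => x) false)
  let st :=
    set_arr.foldl
      (fun (st : Int × Int × List Int) i =>
        if st.1 ≤ (PySem.List.count array i : Int) then
          ((PySem.List.count array i : Int), i, st.2.2 ++ [((PySem.List.count array i : Int))])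
        else st)
      (0, 0, [])
  -- max(new_arr): raises ValueError on empty new_arr (empty array); excluded by Pre_solution
  match PySem.List.max? st.2.2 (fun x => x) with
  | none => 0
  | some m => if 1 < List.count m st.2.2 then -1 else st.2.1

-- ===== PORT B =====
def solution_alt (array : List Int) : Int :=
  -- one pass over sorted(array), grouping equal neighbours into (length, value) runs
  let st :=
    (PySem.List.sorted array (fun x => x) false).foldl
      (fun (st : List (Int × Int) × Int × Int) x =>
        if st.2.2 ≠ 0 ∧ x = st.2.1 then (st.1, st.2.1, st.2.2 + 1)
        else ((if st.2.2 ≠ 0 then st.1 ++ [(st.2.2, st.2.1)] else st.1), x, 1))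
      ([], 0, 0)
  let runs := if st.2.2 ≠ 0 then st.1 ++ [(st.2.2, st.2.1)] else st.1
  -- max([...]): raises ValueError on empty input; excluded by Pre_solution
  match PySem.List.max? (runs.map Prod.fst) (fun c => c) with
  | none => 0
  | some best =>
    let ties := (runs.filter (fun cv => cv.1 == best)).map Prod.snd
    if ties.length = 1 then ties.headD 0 else -1

-- ===== PRECONDITION & SPEC =====
-- Pre_ excludes only the empty list, on which A raises ValueError (max of an empty sequence).
def Pre_solution (array : List Int) : Prop := array ≠ []
instance (array : List Int) : Decidable (Pre_solution array) := by unfold Pre_solution; infer_instance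
def pvWitness_solution : List Int := ([1, 2, 2])
def Spec_solution (array : List Int) (out : Int) : Prop := out = solution_alt array
instance (array : List Int) (out : Int) : Decidable (Spec_solution array out) := by unfold Spec_solution; infer_instance

-- ===== CLAIM (what is proved, stated in full; the proofs are below) =====
def Claim_equal_solution : Prop := ∀ (array : List Int), Dom_solution array → Pre_solution array → Spec_solution array (solution array)

-- ===== LEMMAS AND PROOFS =====

-- A's loop body, abstracted over the count function c
def astep (c : Int → Int) (st : Int × Int × List Int) (i : Int) : Int × Int × List Int :=
  if st.1 ≤ c i then (c i, i, st.2.2 ++ [c i]) else st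

-- B's loop body and final flush
def bstep (st : List (Int × Int) × Int × Int) (x : Int) : List (Int × Int) × Int × Int :=
  if st.2.2 ≠ 0 ∧ x = st.2.1 then (st.1, st.2.1, st.2.2 + 1)
  else ((if st.2.2 ≠ 0 then st.1 ++ [(st.2.2, st.2.1)] else st.1), x, 1)

def flushB (st : List (Int × Int) × Int × Int) : List (Int × Int) :=
  if st.2.2 ≠ 0 then st.1 ++ [(st.2.2, st.2.1)] else st.1

-- the runs B should produce on a sorted list: one (count, value) pair per distinct value
def specRuns (s : List Int) : List (Int × Int) :=
  (PySem.Set.ofList s).map (fun v => ((List.count v s : Int), v))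

theorem A_noop (c : Int → Int) (vs : List Int) (temp ix : Int) (na : List Int)
    (h : ∀ v ∈ vs, c v < temp) :
    vs.foldl (astep c) (temp, ix, na) = (temp, ix, na) := by
  induction vs with
  | nil => rfl
  | cons v t ih =>
    have hv := h v (by simp)
    simp only [List.foldl_cons, astep, if_neg (by omega : ¬ temp ≤ c v)]
    exact ih (fun u hu => h u (by simp [hu]))

theorem A_count (c : Int → Int) (vs : List Int) (M : Int) (temp ix : Int) (na : List Int)
    (htemp : temp ≤ M) (hb : ∀ v ∈ vs, c v ≤ M) :
    List.count M (vs.foldl (astep c) (temp, ix, na)).2.2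
      = List.count M na + vs.countP (fun v => c v == M) := by
  induction vs generalizing temp ix na with
  | nil => simp
  | cons v t ih =>
    simp only [List.foldl_cons, astep, List.countP_cons]
    by_cases hle : temp ≤ c v
    · rw [if_pos hle, ih (c v) v (na ++ [c v]) (hb v (by simp)) (fun u hu => hb u (by simp [hu]))]
      by_cases hM : c v = M
      · simp [hM, List.count_append]
        omega
      · simp [List.count_append, hM]
    · have hvM : ¬ (c v = M) := by omega
      rw [if_neg hle, ih temp ix na htemp (fun u hu => hb u (by simp [hu]))]
      simp [hvM]

theorem A_bound (c : Int → Int) (vs : List Int) (M : Int) (temp ix : Int) (na : List Int)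
    (hna : ∀ y ∈ na, y ≤ M) (hb : ∀ v ∈ vs, c v ≤ M) :
    ∀ y ∈ (vs.foldl (astep c) (temp, ix, na)).2.2, y ≤ M := by
  induction vs generalizing temp ix na with
  | nil => simpa using hna
  | cons v t ih =>
    simp only [List.foldl_cons, astep]
    by_cases hle : temp ≤ c v
    · rw [if_pos hle]
      refine ih (c v) v (na ++ [c v]) ?_ (fun u hu => hb u (by simp [hu]))
      intro y hy
      rcases List.mem_append.1 hy with h1 | h2
      · exact hna y h1
      · simp at h2; subst h2; exact hb v (by simp)
    · rw [if_neg hle]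
      exact ih temp ix na hna (fun u hu => hb u (by simp [hu]))

theorem A_index (c : Int → Int) (vs : List Int) (M v₀ : Int) (temp ix : Int) (na : List Int)
    (htemp : temp ≤ M) (hb : ∀ v ∈ vs, c v ≤ M)
    (hf : vs.filter (fun v => c v == M) = [v₀]) :
    (vs.foldl (astep c) (temp, ix, na)).2.1 = v₀ := by
  induction vs generalizing temp ix na with
  | nil => simp at hf
  | cons v t ih =>
    simp only [List.foldl_cons, astep]
    by_cases hvM : c v = M
    · rw [List.filter_cons_of_pos (by simp [hvM])] at hf
      have hv0 : v = v₀ := by simpa using congrArg (fun l => l.headD 0) hf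
      have ht : t.filter (fun v => c v == M) = [] := by simpa using congrArg List.tail hf
      have hnone : ∀ u ∈ t, c u < M := by
        intro u hu
        have : ¬ (c u == M) = true := by
          intro hc
          have : u ∈ t.filter (fun v => c v == M) := List.mem_filter.2 ⟨hu, hc⟩
          simp [ht] at this
        have : c u ≠ M := by simpa using this
        have := hb u (by simp [hu])
        omega
      rw [if_pos (by omega), A_noop c t (c v) v (na ++ [c v]) (by rw [hvM]; exact hnone)]
      simpa using hv0
    · rw [List.filter_cons_of_neg (by simp [hvM])] at hf
      by_cases hle : temp ≤ c v
      · rw [if_pos hle]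
        exact ih (c v) v (na ++ [c v]) (hb v (by simp)) (fun u hu => hb u (by simp [hu])) hf
      · rw [if_neg hle]
        exact ih temp ix na htemp (fun u hu => hb u (by simp [hu])) hf

theorem discard_ofList (l : List Int) (x : Int) :
    PySem.Set.discard (PySem.Set.ofList l) x
      = PySem.Set.ofList (l.filter (fun y => y != x)) := by
  induction l with
  | nil => rfl
  | cons a t ih =>
    by_cases hax : a = x
    · subst hax
      rw [PySem.Set.ofList_cons, List.filter_cons_of_neg (by simp)]
      simp only [PySem.Set.discard] at ih ⊢
      rw [List.filter_cons_of_neg (by simp), List.filter_filter]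
      rw [show (fun y => (!y == a) && (!y == a)) = (fun y => !y == a) from by
        funext y; by_cases h : y = a <;> simp [h]]
      exact ih
    · rw [PySem.Set.ofList_cons, List.filter_cons_of_pos (by simp [hax]),
          PySem.Set.ofList_cons, ← ih]
      simp only [PySem.Set.discard]
      rw [List.filter_cons_of_pos (by simp [hax]), List.filter_filter, List.filter_filter]
      congr 1
      exact List.filter_congr (fun y _ => by rw [Bool.and_comm])

theorem specRuns_cons (x : Int) (rest : List Int) :
    specRuns (x :: rest)
      = ((1 + List.count x rest : Int), x) :: specRuns (rest.filter (fun y => y != x)) := by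
  unfold specRuns
  rw [PySem.Set.ofList_cons, discard_ofList]
  simp only [List.map_cons, List.count_cons_self]
  rw [show ((1 : Int) + (List.count x rest : Int)) = ((List.count x rest + 1 : Nat) : Int) from by
    push_cast; omega]
  congr 1
  apply List.map_congr_left
  intro v hv
  have hvx : v ≠ x := by
    have h3 := (PySem.Set.mem_ofList _ _).1 hv
    have h4 := List.mem_filter.1 h3
    simpa using h4.2
  have h1 : List.count v (x :: rest) = List.count v rest := by
    rw [List.count_cons_of_ne (by omega)]
  have h2 : List.count v (rest.filter (fun y => y != x)) = List.count v rest :=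
    List.count_filter (by simpa using hvx)
  rw [h1, h2]

theorem B_run (s : List Int) (hp : s.Pairwise (· ≤ ·)) (runs : List (Int × Int)) (cv cc : Int)
    (hcc : 0 < cc) (hcv : ∀ x ∈ s, cv ≤ x) :
    flushB (s.foldl bstep (runs, cv, cc))
      = runs ++ ((cc + List.count cv s : Int), cv) :: specRuns (s.filter (fun y => y != cv)) := by
  induction s generalizing runs cv cc with
  | nil =>
    simp [flushB, specRuns, if_pos (by omega : cc ≠ 0)]
  | cons x t ih =>
    have hp' := (List.pairwise_cons.1 hp).2
    have hxlet := (List.pairwise_cons.1 hp).1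
    by_cases hx : x = cv
    · subst hx
      have hstep : bstep (runs, x, cc) x = (runs, x, cc + 1) := by
        simp only [bstep]
        rw [if_pos (⟨by omega, trivial⟩ : cc ≠ 0 ∧ True)]
      simp only [List.foldl_cons, hstep]
      rw [ih hp' runs x (cc + 1) (by omega) (fun y hy => hcv y (by simp [hy]))]
      rw [List.filter_cons_of_neg (by simp), List.count_cons_self]
      have hc : cc + (↑(List.count x t) + 1) = cc + 1 + ↑(List.count x t) := by omega
      push_cast
      rw [hc]
    · have hcvx : cv < x := lt_of_le_of_ne (hcv x (by simp)) (fun h => hx h.symm)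
      have hnot : cv ∉ x :: t := by
        intro hmem
        rcases List.mem_cons.1 hmem with h | h
        · exact hx h.symm
        · have := hxlet cv h; omega
      have hstep : bstep (runs, cv, cc) x = (runs ++ [(cc, cv)], x, 1) := by
        simp only [bstep]
        rw [if_neg (fun h => hx h.2), if_pos (by omega : cc ≠ 0)]
      simp only [List.foldl_cons, hstep]
      rw [ih hp' (runs ++ [(cc, cv)]) x 1 (by omega) hxlet]
      have hcount : List.count cv (x :: t) = 0 := List.count_eq_zero.2 hnot
      have hfilt : (x :: t).filter (fun y => y != cv) = x :: t := by
        apply List.filter_eq_self.2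
        intro y hy
        have : cv ≠ y := by
          intro h; rw [← h] at hy; exact hnot hy
        simpa using fun h => this h.symm
      rw [hcount, hfilt, specRuns_cons x t]
      simp

theorem ties_eq (c : Int → Int) (M : Int) (vs : List Int) :
    ((vs.map (fun v => (c v, v))).filter (fun cv => cv.1 == M)).map Prod.snd
      = vs.filter (fun v => c v == M) := by
  induction vs with
  | nil => rfl
  | cons v t ih => by_cases h : c v = M <;> simp [h, ih]

theorem solution_main (array : List Int) (h : array ≠ []) :
    solution array = solution_alt array := by
  have hsperm : (PySem.List.sorted array (fun x => x) false).Perm array :=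
    PySem.List.sorted_perm array (fun x => x) false
  set s := PySem.List.sorted array (fun x => x) false with hs
  set c : Int → Int := fun v => ((List.count v s : Nat) : Int) with hc
  set vs : List Int := PySem.Set.ofList s with hvs
  have hA : solution array =
      (match PySem.List.max? (vs.foldl (astep (fun i => ((PySem.List.count array i : Nat) : Int))) (0, 0, [])).2.2 (fun x => x) with
       | none => 0
       | some m =>
         if 1 < List.count m (vs.foldl (astep (fun i => ((PySem.List.count array i : Nat) : Int))) (0, 0, [])).2.2 then -1
         else (vs.foldl (astep (fun i => ((PySem.List.count array i : Nat) : Int))) (0, 0, [])).2.1) := rfl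
  have hceq : (fun i => ((PySem.List.count array i : Nat) : Int)) = c := by
    funext v
    rw [hc]
    rw [PySem.List.count_eq]
    exact congrArg _ (hsperm.count_eq v).symm
  rw [hceq] at hA
  have hB : solution_alt array =
      (match PySem.List.max? ((flushB (s.foldl bstep ([], 0, 0))).map Prod.fst) (fun c => c) with
       | none => 0
       | some best =>
         if (((flushB (s.foldl bstep ([], 0, 0))).filter (fun cv => cv.1 == best)).map Prod.snd).length = 1
         then (((flushB (s.foldl bstep ([], 0, 0))).filter (fun cv => cv.1 == best)).map Prod.snd).headD 0
         else -1) := rfl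
  have hsne : s ≠ [] := by
    rw [hs]
    simpa [PySem.List.sorted_eq_nil_iff] using h
  obtain ⟨x, t, hst⟩ : ∃ x t, s = x :: t := by
    cases hse : s with
    | nil => exact absurd hse hsne
    | cons a b => exact ⟨a, b, rfl⟩
  have hp : s.Pairwise (· ≤ ·) := PySem.List.sorted_pairwise array (fun x => x)
  have hrun : flushB (s.foldl bstep ([], 0, 0)) = vs.map (fun v => (c v, v)) := by
    have hfin : specRuns s = vs.map (fun v => (c v, v)) := by
      unfold specRuns
      rw [← hvs, hc]
    rw [← hfin, hst]
    have hpt := (List.pairwise_cons.1 (hst ▸ hp))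
    have h1 : bstep ([], 0, 0) x = ([], x, 1) := by simp [bstep]
    rw [List.foldl_cons, h1, B_run t hpt.2 [] x 1 one_pos hpt.1, specRuns_cons x t]
    simp
  rw [hrun] at hB
  have hmapfst : (vs.map (fun v => (c v, v))).map Prod.fst = vs.map c := by
    rw [List.map_map]; rfl
  rw [hmapfst] at hB
  -- the maximum count M
  have hxvs : x ∈ vs := by
    rw [hvs]
    exact (PySem.Set.mem_ofList _ _).2 (by rw [hst]; simp)
  have hvsne : vs.map c ≠ [] := by
    simp only [ne_eq, List.map_eq_nil_iff]
    intro hnil; rw [hnil] at hxvs; simp at hxvs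
  cases hmax : PySem.List.max? (vs.map c) (fun c => c) with
  | none => exact absurd ((PySem.List.max?_eq_none_iff _ _).1 hmax) hvsne
  | some M =>
    rw [hmax] at hB
    dsimp only at hB
    rw [ties_eq c M vs] at hB
    obtain ⟨u, hu, hMu⟩ := List.mem_map.1 (PySem.List.max?_mem hmax)
    have hub : ∀ v ∈ vs, c v ≤ M := fun v hv =>
      PySem.List.max?_isMax hmax (c v) (List.mem_map_of_mem hv)
    have hM0 : (0 : Int) ≤ M := by
      rw [← hMu, hc]
      positivity
    set na := (vs.foldl (astep c) ((0 : Int), (0 : Int), ([] : List Int))).2.2 with hna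
    have hcount : List.count M na = vs.countP (fun v => c v == M) := by
      rw [hna, A_count c vs M 0 0 [] hM0 hub]
      simp
    have hk1 : 0 < vs.countP (fun v => c v == M) :=
      List.countP_pos_iff.2 ⟨u, hu, by simp [hMu]⟩
    have hMna : M ∈ na := List.count_pos_iff.1 (by omega)
    have hbound : ∀ y ∈ na, y ≤ M := A_bound c vs M 0 0 [] (by simp) hub
    cases hmaxA : PySem.List.max? na (fun x => x) with
    | none =>
      have := (PySem.List.max?_eq_none_iff _ _).1 hmaxA
      rw [this] at hMna; simp at hMna
    | some m =>
      have hmM : m = M :=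
        le_antisymm (hbound m (PySem.List.max?_mem hmaxA))
          (PySem.List.max?_isMax hmaxA M hMna)
      rw [hmaxA] at hA
      subst hmM
      have hlen : (vs.filter (fun v => c v == m)).length = vs.countP (fun v => c v == m) :=
        List.countP_eq_length_filter.symm
      by_cases hk : 1 < vs.countP (fun v => c v == m)
      · rw [hA, hB]
        simp only [hcount]
        rw [if_pos hk, if_neg (by omega)]
      · have hkeq : vs.countP (fun v => c v == m) = 1 := by omega
        obtain ⟨v₀, hv₀⟩ := List.length_eq_one_iff.1 (by rw [hlen, hkeq])
        have hix : (vs.foldl (astep c) ((0 : Int), (0 : Int), ([] : List Int))).2.1 = v₀ :=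
          A_index c vs m v₀ 0 0 [] hM0 hub hv₀
        rw [hA, hB]
        simp only [hcount]
        rw [if_neg (by omega), if_pos (by rw [hlen, hkeq]), hv₀, hix]
        rfl

theorem solution_spec : Claim_equal_solution := by
  intro array _ hpre
  unfold Spec_solution
  exact solution_main array hpre
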